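-- pv_equiv track=rewrite | github.com/lijunpeng2022/kbqa_code | src/mention_extractor.py | restore_entity_from_labels
-- ===== SOURCE A (Python) =====
-- def restore_entity_from_labels(labels, question):
--     entitys = []
--     str = ''
--     labels = labels[1:-1]
--     for i in range(min(len(labels), len(question))):
--         if labels[i] == 1:
--             str += question[i]
--         else:
--             if len(str):
--                 entitys.append(str)
--                 str = ''
--     if len(str):
--         entitys.append(str)
--     return entitys
-- ===== SOURCE B (Python) =====
-- def restore_entity_from_labels(labels, question):
--     pairs = list(zip(labels[1:-1], question))
--     n = len(pairs)
--     res = []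
--     k = 0
--     while k < n:
--         if pairs[k][0] != 1:
--             k += 1
--         else:
--             j = k
--             while j < n and pairs[j][0] == 1:
--                 j += 1
--             res.append(''.join(ch for _, ch in pairs[k:j]))
--             k = j
--     return res
-- ===== Notes on version B (the rewrite author's own statement) =====
-- stated objective: idiomatic
-- what changed: Replaced A's single index loop with mutable buffer/flush state by a recursive run decomposition: zip the trimmed labels with the question and repeatedly split off the leading run of label-1 pairs (span), joining each run's characters.
import Mathlib
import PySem

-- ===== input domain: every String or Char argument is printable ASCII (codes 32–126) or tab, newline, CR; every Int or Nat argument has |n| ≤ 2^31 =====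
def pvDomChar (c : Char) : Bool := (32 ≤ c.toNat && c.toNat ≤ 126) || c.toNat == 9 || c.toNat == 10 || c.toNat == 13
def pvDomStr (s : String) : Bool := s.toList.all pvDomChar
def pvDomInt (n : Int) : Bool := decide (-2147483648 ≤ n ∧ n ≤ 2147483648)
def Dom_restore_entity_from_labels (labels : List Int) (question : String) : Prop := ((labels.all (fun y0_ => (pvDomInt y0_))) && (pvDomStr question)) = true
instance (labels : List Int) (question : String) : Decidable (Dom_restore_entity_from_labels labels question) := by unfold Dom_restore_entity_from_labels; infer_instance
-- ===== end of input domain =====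

-- B replaces A's single loop with mutable buffer/flush state by a two-pointer run
-- scan over zip(labels[1:-1], question): find each maximal label-1 run and slice it out.

-- ===== PORT A =====
-- transliteration of A: trim labels, loop i over range(min(len,len)), accumulate a
-- buffer on label==1, flush on other labels, final flush.
def restore_entity_from_labels (labels : List Int) (question : String) : List String :=
  let q := question.toList
  let lab := PySem.List.slice labels (some 1) (some (-1))
  let st := (List.range (min lab.length q.length)).foldl
    (fun (st : List String × List Char) (i : Nat) =>
      if lab.getD i 0 = 1 then (st.1, st.2 ++ [q.getD i ' '])
      else if st.2.length ≠ 0 then (st.1 ++ [String.mk st.2], ([] : List Char))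
      else st)
    ([], [])
  if st.2.length ≠ 0 then st.1 ++ [String.mk st.2] else st.1

-- ===== PORT B =====
-- inner while: advance j past the current run of label-1 pairs
def pvFindRunEnd (pairs : List (Int × Char)) (n : Nat) (j : Nat) : Nat :=
  if j < n ∧ (pairs.getD j (0, ' ')).1 = 1 then pvFindRunEnd pairs n (j + 1) else j
termination_by n - j
decreasing_by omega

-- needed by pvScan for termination: pvFindRunEnd never moves backwards
theorem pvFindRunEnd_ge (pairs : List (Int × Char)) (n : Nat) :
    ∀ j, j ≤ pvFindRunEnd pairs n j := by
  intro j
  induction j using (pvFindRunEnd.induct pairs n) with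
  | case1 j h ih => rw [pvFindRunEnd, if_pos h]; omega
  | case2 j h => rw [pvFindRunEnd, if_neg h]

-- outer while: skip non-1 pairs, slice out each maximal label-1 run
def pvScan (pairs : List (Int × Char)) (n : Nat) (res : List String) (k : Nat) : List String :=
  if hk : k < n then
    if hp : (pairs.getD k (0, ' ')).1 ≠ 1 then pvScan pairs n res (k + 1)
    else
      let j := pvFindRunEnd pairs n k
      pvScan pairs n
        (res ++ [String.mk (((pairs.drop k).take (j - k)).map Prod.snd)]) j
  else res
termination_by n - k
decreasing_by
  · omega
  · have h1 : k + 1 ≤ pvFindRunEnd pairs n (k + 1) := pvFindRunEnd_ge pairs n (k + 1)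
    have h2 : pvFindRunEnd pairs n k = pvFindRunEnd pairs n (k + 1) := by
      rw [pvFindRunEnd, if_pos ⟨hk, by omega⟩]
    omega

def restore_entity_from_labels_alt (labels : List Int) (question : String) : List String :=
  let pairs := (PySem.List.slice labels (some 1) (some (-1))).zip question.toList
  pvScan pairs pairs.length [] 0

-- ===== PRECONDITION & SPEC =====
def Spec_restore_entity_from_labels (labels : List Int) (question : String) (out : List String) : Prop := out = restore_entity_from_labels_alt labels question
instance (labels : List Int) (question : String) (out : List String) : Decidable (Spec_restore_entity_from_labels labels question out) := by unfold Spec_restore_entity_from_labels; infer_instance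

-- ===== CLAIM (what is proved, stated in full; the proofs are below) =====
def Claim_equal_restore_entity_from_labels : Prop := ∀ (labels : List Int) (question : String), Dom_restore_entity_from_labels labels question → Spec_restore_entity_from_labels labels question (restore_entity_from_labels labels question)

-- ===== LEMMAS AND PROOFS =====

-- A's loop step and final flush, named for the proof
def stepA (st : List String × List Char) (p : Int × Char) : List String × List Char :=
  if p.1 = 1 then (st.1, st.2 ++ [p.2])
  else if st.2.length ≠ 0 then (st.1 ++ [String.mk st.2], ([] : List Char))
  else st

def flushA (st : List String × List Char) : List String :=
  if st.2.length ≠ 0 then st.1 ++ [String.mk st.2] else st.1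

-- structural middle man between the two loops: runs of label-1 pairs
def pvRuns : List (Int × Char) → List String
  | [] => []
  | (f, c) :: rest =>
    if f ≠ 1 then pvRuns rest
    else
      String.mk ((((f, c) :: rest).takeWhile (fun p => p.1 = 1)).map Prod.snd)
        :: pvRuns (((f, c) :: rest).dropWhile (fun p => p.1 = 1))
termination_by ps => ps.length
decreasing_by
  · simp
  · rename_i hf
    have hf1 : f = 1 := not_not.mp hf
    simp [List.dropWhile_cons, hf1]
    have := List.length_dropWhile_le (fun (p : Int × Char) => decide (p.1 = 1)) rest
    omega

-- index loop over range(min len len) = fold over the zip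
theorem foldl_range_getD {σ : Type} (f : σ → Int × Char → σ) :
    ∀ (xs : List Int) (ys : List Char) (s : σ),
    (List.range (min xs.length ys.length)).foldl
        (fun st i => f st (xs.getD i 0, ys.getD i ' ')) s
      = (xs.zip ys).foldl f s := by
  intro xs
  induction xs with
  | nil => intro ys s; simp
  | cons x xs ih =>
    intro ys s
    cases ys with
    | nil => simp
    | cons y ys =>
      have hmin : min (x :: xs).length (y :: ys).length
          = (min xs.length ys.length) + 1 := by simp
      rw [hmin, List.range_succ_eq_map]
      simp only [List.foldl_cons, List.foldl_map, List.getD_cons_succ,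
        List.getD_cons_zero, List.zip_cons_cons]
      exact ih ys (f s (x, y))

-- buffer/flush fold = run decomposition, generalized over accumulator and buffer
theorem foldl_stepA_runs :
    ∀ (ps : List (Int × Char)) (acc : List String) (buf : List Char),
    flushA (ps.foldl stepA (acc, buf))
      = acc ++ (if buf = [] then pvRuns ps
          else String.mk (buf ++ ((ps.takeWhile (fun p => p.1 = 1)).map Prod.snd))
            :: pvRuns (ps.dropWhile (fun p => p.1 = 1))) := by
  intro ps
  induction ps with
  | nil =>
    intro acc buf
    by_cases h : buf = [] <;> simp [flushA, pvRuns, h]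
  | cons p rest ih =>
    intro acc buf
    obtain ⟨f, c⟩ := p
    by_cases hf : f = 1
    · have hstep : stepA (acc, buf) (f, c) = (acc, buf ++ [c]) := by
        simp [stepA, hf]
      rw [List.foldl_cons, hstep, ih]
      by_cases h : buf = [] <;>
        simp [h, pvRuns, hf, List.takeWhile_cons, List.dropWhile_cons]
    · have hstep : stepA (acc, buf) (f, c)
          = (if buf = [] then (acc, ([] : List Char))
             else (acc ++ [String.mk buf], ([] : List Char))) := by
        by_cases h : buf = [] <;> simp [stepA, hf, h]
      rw [List.foldl_cons, hstep]
      by_cases h : buf = []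
      · simp [h, ih, pvRuns, hf]
      · rw [if_neg h, ih (acc ++ [String.mk buf]) []]
        simp [pvRuns, hf, h, List.takeWhile_cons, List.dropWhile_cons]

-- the inner while ends exactly at k + length of the leading label-1 run of drop k
theorem pvFindRunEnd_eq (pairs : List (Int × Char)) :
    ∀ k, pvFindRunEnd pairs pairs.length k
      = k + ((pairs.drop k).takeWhile (fun p => p.1 = 1)).length := by
  intro k
  induction k using (pvFindRunEnd.induct pairs pairs.length) with
  | case1 k h ih =>
    obtain ⟨hk, hp⟩ := h
    have hdrop : pairs.drop k = pairs[k] :: pairs.drop (k + 1) :=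
      List.drop_eq_getElem_cons hk
    have hget : (pairs.getD k (0, ' ')) = pairs[k] := List.getD_eq_getElem _ _ hk
    rw [pvFindRunEnd, if_pos ⟨hk, hp⟩, ih, hdrop, List.takeWhile_cons,
      if_pos (by rw [hget] at hp; exact decide_eq_true hp)]
    simp; omega
  | case2 k h =>
    rw [pvFindRunEnd, if_neg h]
    by_cases hk : k < pairs.length
    · have hdrop : pairs.drop k = pairs[k] :: pairs.drop (k + 1) :=
        List.drop_eq_getElem_cons hk
      have hget : (pairs.getD k (0, ' ')) = pairs[k] := List.getD_eq_getElem _ _ hk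
      have hp : ¬ (pairs[k].1 = 1) := by
        intro hc; exact h ⟨hk, by rw [hget]; exact hc⟩
      rw [hdrop, List.takeWhile_cons, if_neg (by simpa using hp)]
      simp
    · rw [List.drop_eq_nil_of_le (by omega)]; simp

-- taking the leading run is takeWhile
theorem take_takeWhile_len {α : Type} (p : α → Bool) (xs : List α) :
    xs.take (xs.takeWhile p).length = xs.takeWhile p := by
  induction xs with
  | nil => simp
  | cons x xs ih =>
    by_cases h : p x = true <;>
      simp [List.takeWhile_cons, h, ih]

-- dropping the leading run is dropWhile
theorem drop_takeWhile_len {α : Type} (p : α → Bool) (xs : List α) :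
    xs.drop (xs.takeWhile p).length = xs.dropWhile p := by
  induction xs with
  | nil => simp
  | cons x xs ih =>
    by_cases h : p x = true <;>
      simp [List.takeWhile_cons, List.dropWhile_cons, h, ih]

-- the outer while from position k produces the runs of drop k
theorem pvScan_eq_runs (pairs : List (Int × Char)) :
    ∀ res k, pvScan pairs pairs.length res k = res ++ pvRuns (pairs.drop k) := by
  intro res k
  induction res, k using (pvScan.induct pairs pairs.length) with
  | case1 res k hk hp ih =>
    have hget : (pairs.getD k (0, ' ')) = pairs[k] := List.getD_eq_getElem _ _ hk
    rcases hpk : pairs[k] with ⟨f, c⟩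
    have hdrop : pairs.drop k = (f, c) :: pairs.drop (k + 1) := by
      rw [List.drop_eq_getElem_cons hk, hpk]
    have hf : f ≠ 1 := by rw [hget, hpk] at hp; exact hp
    rw [pvScan, dif_pos hk, dif_pos hp, ih, hdrop]
    simp only [pvRuns]
    rw [if_pos hf]
  | case2 res k hk hp j ih =>
    have hget : (pairs.getD k (0, ' ')) = pairs[k] := List.getD_eq_getElem _ _ hk
    rcases hpk : pairs[k] with ⟨f, c⟩
    have hdrop : pairs.drop k = (f, c) :: pairs.drop (k + 1) := by
      rw [List.drop_eq_getElem_cons hk, hpk]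
    have hf : f = 1 := by rw [hget, hpk] at hp; simpa using hp
    have hj := pvFindRunEnd_eq pairs k
    have htake : (pairs.drop k).take (pvFindRunEnd pairs pairs.length k - k)
        = (pairs.drop k).takeWhile (fun p => p.1 = 1) := by
      rw [hj, Nat.add_sub_cancel_left]
      exact take_takeWhile_len _ _
    have hdropj : pairs.drop (pvFindRunEnd pairs pairs.length k)
        = (pairs.drop k).dropWhile (fun p => p.1 = 1) := by
      rw [hj, ← drop_takeWhile_len (fun p : Int × Char => p.1 = 1) (pairs.drop k),
        List.drop_drop, Nat.add_comm]
    rw [pvScan, dif_pos hk, dif_neg hp]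
    simp only []
    rw [ih, htake, hdropj]
    conv_rhs => rw [hdrop]
    simp only [pvRuns]
    rw [if_neg (by simp [hf]), ← hdrop]
    simp
  | case3 res k hk =>
    rw [pvScan, dif_neg hk, List.drop_eq_nil_of_le (by omega)]
    simp [pvRuns]

-- ===== VERDICT (by name: the statement is the Claim_ definition above) =====
theorem restore_entity_from_labels_spec : Claim_equal_restore_entity_from_labels := by
  intro labels question _
  unfold Spec_restore_entity_from_labels
  simp only [restore_entity_from_labels, restore_entity_from_labels_alt]
  have hbridge := foldl_range_getD stepA
      (PySem.List.slice labels (some 1) (some (-1))) question.toList ([], [])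
  have hcore := foldl_stepA_runs
      ((PySem.List.slice labels (some 1) (some (-1))).zip question.toList) [] []
  have hscan := pvScan_eq_runs
      ((PySem.List.slice labels (some 1) (some (-1))).zip question.toList) [] 0
  simp only [flushA, stepA] at hbridge hcore
  rw [hbridge, hscan]
  simpa using hcore
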